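-- pv_equiv track=rewrite | github.com/amamic1803/Coding-Challenges | Anagram/Python/Anagram.py | poc_abc
-- ===== SOURCE A (Python) =====
-- def poc_abc(lista_1, ext):
--     zad_slovo = ext[-1]
--
--     temp_lista = []
--     for y in lista_1:
--         if y == zad_slovo:
--             pass
--         else:
--             temp_lista.append(y)
--     temp_lista.sort()
--
--     for a in range(len(temp_lista)):
--         if lista_1.count(temp_lista[a]) - (len(lista_1) - lista_1.count(temp_lista[a])) >= 1:
--             return temp_lista[a]
--
--     return temp_lista[0]
-- ===== SOURCE B (Python) =====
-- def poc_abc(lista_1, ext):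
--     zad_slovo = ext[-1]
--     sorted_filtered = sorted(y for y in lista_1 if y != zad_slovo)
--     cand, bal = None, 0
--     for y in lista_1:
--         if bal == 0:
--             cand, bal = y, 1
--         elif y == cand:
--             bal += 1
--         else:
--             bal -= 1
--     if cand is not None and 2 * lista_1.count(cand) > len(lista_1) and cand != zad_slovo:
--         return cand
--     return sorted_filtered[0]
-- ===== Notes on version B (the rewrite author's own statement) =====
-- stated objective: faster
-- what changed: Replaces A's scan of the sorted filtered list with an O(n^2) repeated lista_1.count call per element by one Boyer-Moore voting pass that maintains a single candidate and balance counter, followed by one verification count of the candidate.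
import Mathlib
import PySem

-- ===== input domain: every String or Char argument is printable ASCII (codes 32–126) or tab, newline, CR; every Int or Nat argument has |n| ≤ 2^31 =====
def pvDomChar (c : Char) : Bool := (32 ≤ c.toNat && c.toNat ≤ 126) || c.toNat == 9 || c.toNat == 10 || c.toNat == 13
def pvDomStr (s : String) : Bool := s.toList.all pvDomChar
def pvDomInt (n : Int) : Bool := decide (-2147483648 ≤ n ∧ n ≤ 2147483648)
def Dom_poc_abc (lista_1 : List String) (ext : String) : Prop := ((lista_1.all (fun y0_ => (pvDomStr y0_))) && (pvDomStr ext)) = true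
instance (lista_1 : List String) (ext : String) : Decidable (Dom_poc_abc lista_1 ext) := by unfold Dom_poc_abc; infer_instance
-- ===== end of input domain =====

-- B replaces A's scan of the sorted list that calls lista_1.count twice per element by one
-- Boyer–Moore voting pass plus a single verification count; return values proved identical on Pre_.

-- ===== PORT A =====
-- the loop 'for a in range(len(temp_lista)): if count(..) - (len(..) - count(..)) >= 1: return temp_lista[a]'
def pocFindA (lista_1 : List String) : List String → Option String
  | [] => none
  | t :: rest =>
    if ((PySem.List.count lista_1 t : Int) - ((lista_1.length : Int) - (PySem.List.count lista_1 t : Int)) ≥ 1)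
    then some t else pocFindA lista_1 rest

def poc_abc (lista_1 : List String) (ext : String) : String :=
  -- ext[-1]; none = IndexError, excluded by Pre_
  let zad_slovo : String := ((PySem.Str.pyGet? ext (-1)).map fun c => String.ofList [c]).getD ""
  let temp_lista := lista_1.foldl (fun acc y => if y == zad_slovo then acc else acc ++ [y]) []
  let temp_sorted := PySem.List.sorted temp_lista (fun x => x) false
  match pocFindA lista_1 temp_sorted with
  | some r => r
  | none => (PySem.List.pyGet? temp_sorted 0).getD ""   -- temp_lista[0]; none = IndexError, excluded by Pre_

-- ===== PORT B =====
-- one step of Boyer–Moore voting: state = (candidate, balance)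
def bmStep (s : Option String × Int) (y : String) : Option String × Int :=
  if s.2 = 0 then (some y, 1)
  else if some y = s.1 then (s.1, s.2 + 1)
  else (s.1, s.2 - 1)

def poc_abc_alt (lista_1 : List String) (ext : String) : String :=
  let zad_slovo : String := ((PySem.Str.pyGet? ext (-1)).map fun c => String.ofList [c]).getD ""
  let sorted_filtered := PySem.List.sorted (lista_1.filter (fun y => !(y == zad_slovo))) (fun x => x) false
  let st : Option String × Int := lista_1.foldl bmStep (none, 0)
  match st.1 with
  | some cand =>
    if 2 * (PySem.List.count lista_1 cand : Int) > (lista_1.length : Int) ∧ cand ≠ zad_slovo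
    then cand
    else (PySem.List.pyGet? sorted_filtered 0).getD ""   -- sorted_filtered[0]; none = IndexError, excluded by Pre_
  | none => (PySem.List.pyGet? sorted_filtered 0).getD ""

-- ===== PRECONDITION & SPEC =====
-- Pre_ excludes exactly the inputs where A raises IndexError: ext = '' (on ext[-1]) and
-- lists whose every element equals the last character of ext (on temp_lista[0]).
def Pre_poc_abc (lista_1 : List String) (ext : String) : Prop :=
  ext.toList ≠ [] ∧ ∃ y ∈ lista_1, y ≠ String.ofList [ext.toList.getLastD ' ']
instance (lista_1 : List String) (ext : String) : Decidable (Pre_poc_abc lista_1 ext) := by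
  unfold Pre_poc_abc; infer_instance

def pvWitness_poc_abc : List String × String := (["ab", "cd", "ab"], "x")

def Spec_poc_abc (lista_1 : List String) (ext : String) (out : String) : Prop := out = poc_abc_alt lista_1 ext
instance (lista_1 : List String) (ext : String) (out : String) : Decidable (Spec_poc_abc lista_1 ext out) := by unfold Spec_poc_abc; infer_instance

-- ===== CLAIM (what is proved, stated in full; the proofs are below) =====
def Claim_equal_poc_abc : Prop := ∀ (lista_1 : List String) (ext : String), Dom_poc_abc lista_1 ext → Pre_poc_abc lista_1 ext → Spec_poc_abc lista_1 ext (poc_abc lista_1 ext)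

-- ===== LEMMAS AND PROOFS =====

-- A's append-filter loop builds exactly B's List.filter
theorem pocFilterLoop (zad : String) (l : List String) (acc : List String) :
    l.foldl (fun acc y => if y == zad then acc else acc ++ [y]) acc
      = acc ++ l.filter (fun y => !(y == zad)) := by
  induction l generalizing acc with
  | nil => simp
  | cons y rest ih =>
    rw [List.foldl_cons, List.filter_cons]
    by_cases h : (y == zad) = true
    · rw [if_pos h, if_neg (by simp [h]), ih]
    · rw [if_neg h, if_pos (by simp_all), ih, List.append_assoc, List.singleton_append]

theorem bm_nonneg (l : List String) (cand : Option String) (cnt : Int) (h : 0 ≤ cnt) :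
    0 ≤ (l.foldl bmStep (cand, cnt)).2 := by
  induction l generalizing cand cnt with
  | nil => simpa using h
  | cons y rest ih =>
    rw [List.foldl_cons, bmStep]
    by_cases h0 : cnt = 0
    · rw [if_pos h0]; exact ih _ _ (by omega)
    · rw [if_neg h0]
      by_cases hy : some y = cand
      · rw [if_pos hy]; exact ih _ _ (by omega)
      · rw [if_neg hy]; exact ih _ _ (by omega)

-- Boyer–Moore invariant: anything other than the final candidate occurs at most half the time
theorem bm_inv (l : List String) (cand : Option String) (cnt : Int) (h : 0 ≤ cnt) :
    ∀ x : String, some x ≠ (l.foldl bmStep (cand, cnt)).1 →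
      2 * (List.count x l : Int) + (if some x = cand then 2 * cnt else 0)
        ≤ (l.length : Int) + cnt - (l.foldl bmStep (cand, cnt)).2 := by
  induction l generalizing cand cnt with
  | nil =>
    intro x hx
    rw [if_neg (fun h' => hx (by simpa using h'))]
    simp
  | cons y rest ih =>
    intro x hx
    rw [List.foldl_cons, bmStep] at hx ⊢
    have hcnt : (List.count x (y :: rest) : Int) = (List.count x rest : Int) + (if x = y then 1 else 0) := by
      by_cases hxy : x = y
      · simp [hxy]
      · simp [hxy, Ne.symm hxy]
    rw [hcnt]
    by_cases h0 : cnt = 0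
    · rw [if_pos h0] at hx ⊢
      have := ih (some y) 1 (by omega) x hx
      subst h0
      by_cases hxy : x = y
      · rw [if_pos (by rw [hxy])] at this
        rw [if_pos hxy]
        by_cases hxc : some x = cand <;> [rw [if_pos hxc]; rw [if_neg hxc]] <;>
          · simp only [List.length_cons] at this ⊢; push_cast at this ⊢; omega
      · rw [if_neg (by simpa using hxy)] at this
        rw [if_neg hxy]
        by_cases hxc : some x = cand <;> [rw [if_pos hxc]; rw [if_neg hxc]] <;>
          · simp only [List.length_cons] at this ⊢; push_cast at this ⊢; omega
    · rw [if_neg h0] at hx ⊢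
      by_cases hy : some y = cand
      · rw [if_pos hy] at hx ⊢
        have := ih cand (cnt + 1) (by omega) x hx
        by_cases hxc : some x = cand
        · have hxy : x = y := by
            have : some x = some y := hxc.trans hy.symm
            simpa using this
          rw [if_pos hxc] at this ⊢
          rw [if_pos hxy]
          simp only [List.length_cons] at this ⊢; push_cast at this ⊢; omega
        · have hxy : x ≠ y := fun h' => hxc (h' ▸ hy)
          rw [if_neg hxc] at this ⊢
          rw [if_neg hxy]
          simp only [List.length_cons] at this ⊢; push_cast at this ⊢; omega
      · rw [if_neg hy] at hx ⊢
        have := ih cand (cnt - 1) (by omega) x hx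
        by_cases hxc : some x = cand
        · have hxy : x ≠ y := fun h' => hy (h' ▸ hxc)
          rw [if_pos hxc] at this ⊢
          rw [if_neg hxy]
          simp only [List.length_cons] at this ⊢; push_cast at this ⊢; omega
        · rw [if_neg hxc] at this ⊢
          by_cases hxy : x = y <;> [rw [if_pos hxy]; rw [if_neg hxy]] <;>
            · simp only [List.length_cons] at this ⊢; push_cast at this ⊢; omega

-- corollary at the initial state (None, 0) of B's loop
theorem bm_bound (l : List String) (x : String)
    (hx : some x ≠ (l.foldl bmStep (none, 0)).1) :
    2 * (List.count x l : Int) ≤ (l.length : Int) := by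
  have h1 := bm_inv l none 0 (by omega) x hx
  have h2 := bm_nonneg l none 0 (by omega)
  simp at h1
  omega

theorem pocFindA_none (lista_1 ts : List String)
    (h : ∀ t ∈ ts, ¬ (2 * (List.count t lista_1 : Int) > (lista_1.length : Int))) :
    pocFindA lista_1 ts = none := by
  induction ts with
  | nil => rfl
  | cons t rest ih =>
    have ht := h t (by simp)
    rw [pocFindA, if_neg (by rw [PySem.List.count_eq]; omega)]
    exact ih fun t' ht' => h t' (by simp [ht'])

theorem pocFindA_some (lista_1 ts : List String) (m : String)
    (hm : m ∈ ts) (hP : 2 * (List.count m lista_1 : Int) > (lista_1.length : Int))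
    (huniq : ∀ t ∈ ts, 2 * (List.count t lista_1 : Int) > (lista_1.length : Int) → t = m) :
    pocFindA lista_1 ts = some m := by
  induction ts with
  | nil => cases hm
  | cons t rest ih =>
    by_cases hP_t : 2 * (List.count t lista_1 : Int) > (lista_1.length : Int)
    · have : t = m := huniq t (by simp) hP_t
      subst this
      rw [pocFindA, if_pos (by rw [PySem.List.count_eq]; omega)]
    · rw [pocFindA, if_neg (by rw [PySem.List.count_eq]; omega)]
      have hm' : m ∈ rest := by
        rcases hm with _ | h
        · exact absurd hP hP_t
        · assumption
      exact ih hm' fun t' ht' => huniq t' (by simp [ht'])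

-- ===== VERDICT (by name: the statement is the Claim_ definition above) =====
theorem poc_abc_spec : Claim_equal_poc_abc := by
  intro lista_1 ext _ _
  unfold Spec_poc_abc poc_abc poc_abc_alt
  simp only [pocFilterLoop, List.nil_append]
  set zad : String := ((PySem.Str.pyGet? ext (-1)).map fun c => String.ofList [c]).getD "" with hzad
  set ts := PySem.List.sorted (lista_1.filter (fun y => !(y == zad))) (fun x => x) false with hts
  set st := lista_1.foldl bmStep (none, 0) with hst
  have hmem_ts : ∀ t, t ∈ ts → t ≠ zad := by
    intro t ht
    rw [hts, PySem.List.mem_sorted, List.mem_filter] at ht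
    simpa using ht.2
  cases hc : st.1 with
  | none =>
    have hnone : pocFindA lista_1 ts = none := by
      apply pocFindA_none
      intro t _ hPt
      have := bm_bound lista_1 t (by rw [← hst, hc]; simp)
      omega
    rw [hnone]
  | some cand =>
    dsimp only
    by_cases hcond : 2 * (PySem.List.count lista_1 cand : Int) > (lista_1.length : Int) ∧ cand ≠ zad
    · rw [if_pos hcond]
      obtain ⟨hmaj, hne⟩ := hcond
      rw [PySem.List.count_eq] at hmaj
      have hmem : cand ∈ lista_1 := List.count_pos_iff.mp (by omega)
      have : pocFindA lista_1 ts = some cand := by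
        apply pocFindA_some
        · rw [hts, PySem.List.mem_sorted, List.mem_filter]
          simpa using ⟨hmem, hne⟩
        · exact hmaj
        · intro t _ hPt
          by_contra htc
          have := bm_bound lista_1 t (by rw [← hst, hc]; simp [htc])
          omega
      rw [this]
    · rw [if_neg hcond]
      have hnone : pocFindA lista_1 ts = none := by
        apply pocFindA_none
        intro t hmem hPt
        by_cases htc : t = cand
        · subst htc
          exact hcond ⟨by rw [PySem.List.count_eq]; omega, hmem_ts t hmem⟩
        · have := bm_bound lista_1 t (by rw [← hst, hc]; simp [htc])
          omega
      rw [hnone]
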